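-- pv_equiv track=rewrite | github.com/JPedroSilveira/label-specific-fsl | src/util/matrix_util.py | sort_matrix_columns
-- ===== SOURCE A (Python) =====
-- import functools
-- from typing import Any, List
--
-- class MatrixColumn:
--     def __init__(self, values: List[Any]):
--         self.values = values
--     def __str__(self):
--         return f"Column {self.index}:\n" + "\n".join(str(value) for value in self.values)
--
-- def sort_matrix_columns(matrix: List[List[Any]], reverse: bool = False):
--     '''
--     Order a matrix based on rows values,
--     starting by the first row and using the others as tiebreakers.
--
--     Conditions:
--     - Matrix should be a list of lists where each list is a row;
--     - Matrix should have all columns with the same size;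
--     - Matrix should have all rows with same size.
--     '''
--     n_rows = len(matrix)
--     if n_rows == 0:
--         return matrix
--     n_columns = len(matrix[0])
--     if n_columns == 0:
--         return matrix
--     columns: List[MatrixColumn] = []
--     for column in range(0, n_columns):
--         values = []
--         for row in range(0, n_rows):
--             values.append(matrix[row][column])
--         columns.append(MatrixColumn(values=values))
--     sorted_columns: List[MatrixColumn]  = sorted(columns, key=functools.cmp_to_key(_compare), reverse=reverse)
--     ordered_matrix = []
--     for row in range(0, n_rows):
--         ordered_matrix.append([])
--     for column in sorted_columns:
--         for row_index, row_value in enumerate(column.values):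
--             ordered_matrix[row_index].append(row_value)
--     return ordered_matrix
--
-- def _compare(a: MatrixColumn, b: MatrixColumn):
--     for index, a_value in enumerate(a.values):
--         b_value = b.values[index]
--         if a_value > b_value: # When a has a value greater than b, it ends and a "wins"
--             return 1
--         if b_value > a_value: # When b has a value greater than a, it ends and b "wins"
--             return -1
--         # When a_value == b_value it should continue to the next value
--     return 0 # If lists are identical
-- ===== SOURCE B (Python) =====
-- def sort_matrix_columns(matrix, reverse=False):
--     '''LSD radix sort of the columns: one stable single-key sorting pass per row,
--     processing rows from the last to the first, then transpose back.'''
--     if len(matrix) == 0: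
--         return matrix
--     if len(matrix[0]) == 0:
--         return matrix
--     cols = [[row[c] for row in matrix] for c in range(len(matrix[0]))]
--     for r in range(len(matrix) - 1, -1, -1):
--         cols = sorted(cols, key=lambda col: col[r], reverse=reverse)
--     return [[col[r] for col in cols] for r in range(len(matrix))]
-- ===== Notes on version B (the rewrite author's own statement) =====
-- stated objective: alternative
-- what changed: Replaces the single cmp_to_key comparison sort of MatrixColumn objects by an LSD radix sort: one stable single-key sorted() pass per row from the last row up, relying on sort stability to compose the lexicographic order, with comprehension/zip-style column extraction and transpose instead of index loops.
import Mathlib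
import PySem

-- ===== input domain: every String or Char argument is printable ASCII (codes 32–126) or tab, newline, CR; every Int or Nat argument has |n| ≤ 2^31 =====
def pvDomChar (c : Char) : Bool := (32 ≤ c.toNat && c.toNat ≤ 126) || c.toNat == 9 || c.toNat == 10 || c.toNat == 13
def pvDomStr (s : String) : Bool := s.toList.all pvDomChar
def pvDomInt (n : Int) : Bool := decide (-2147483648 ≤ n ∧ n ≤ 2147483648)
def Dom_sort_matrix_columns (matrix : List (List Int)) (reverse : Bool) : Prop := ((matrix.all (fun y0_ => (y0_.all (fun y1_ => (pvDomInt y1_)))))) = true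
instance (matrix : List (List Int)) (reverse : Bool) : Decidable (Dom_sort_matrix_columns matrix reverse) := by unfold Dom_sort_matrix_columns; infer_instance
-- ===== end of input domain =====

-- B replaces A's single cmp_to_key lexicographic sort of the columns by an LSD radix sort:
-- one stable single-key sorting pass per row (last row first), then a map-based transpose.


-- ===== PORT A =====
-- helper _compare: walks a's values, reading b's value at the same index (ported as walking
-- both lists in step; the 'cons, nil' case is where Python's b.values[index] would raise, but
-- every call below compares two columns of equal length n_rows, so it is never reached there)
def pvCompare : List Int → List Int → Int
  | [], _ => 0
  | _ :: _, [] => 0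
  | x :: xs, y :: ys => if x > y then 1 else if y > x then (-1) else pvCompare xs ys

def sort_matrix_columns (matrix : List (List Int)) (reverse : Bool) : List (List Int) :=
  let n_rows : Int := PySem.List.len matrix
  if n_rows = 0 then matrix
  else
    let n_columns : Int := PySem.List.len (PySem.List.pyGetD matrix 0 [])
    if n_columns = 0 then matrix
    else
      let columns : List (List Int) :=
        (PySem.List.pyRange 0 n_columns).foldl (fun cols column =>
          cols ++ [(PySem.List.pyRange 0 n_rows).foldl (fun values row =>
            values ++ [PySem.List.pyGetD (PySem.List.pyGetD matrix row []) column 0]) []]) []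
      -- sorted(columns, key=functools.cmp_to_key(_compare), reverse=reverse):
      -- Python's stable sort places x before exactly the already-seen elements y with
      -- cmp(x,y) < 0 (cmp(y,x) < 0 when reverse=True) — PySem.List.sorted's insertBy
      -- shape with that before-test
      let sorted_columns : List (List Int) :=
        columns.foldl (fun acc x => PySem.List.insertBy
          (fun a b => if reverse then decide (pvCompare b a < 0) else decide (pvCompare a b < 0)) x acc) []
      let ordered0 : List (List Int) :=
        (PySem.List.pyRange 0 n_rows).foldl (fun om _ => om ++ [([] : List Int)]) []
      -- for column in sorted_columns: for row_index, row_value in enumerate(column.values):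
      --   ordered_matrix[row_index].append(row_value)   (enumerate (i, v) ported as zipIdx (v, i))
      sorted_columns.foldl (fun om column =>
        (column.zipIdx).foldl (fun om p => om.modify p.2 (fun row => row ++ [p.1])) om) ordered0

-- ===== PORT B =====
def sort_matrix_columns_alt (matrix : List (List Int)) (reverse : Bool) : List (List Int) :=
  if PySem.List.len matrix = 0 then matrix
  else if PySem.List.len (PySem.List.pyGetD matrix 0 []) = 0 then matrix
  else
    let cols : List (List Int) :=
      (PySem.List.pyRange 0 (PySem.List.len (PySem.List.pyGetD matrix 0 []))).map
        (fun c => matrix.map (fun row => PySem.List.pyGetD row c 0))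
    let sortedCols : List (List Int) :=
      (PySem.List.pyRange (PySem.List.len matrix - 1) (-1) (-1)).foldl
        (fun cs r => PySem.List.sorted cs (fun col => PySem.List.pyGetD col r 0) reverse) cols
    (PySem.List.pyRange 0 (PySem.List.len matrix)).map
      (fun r => sortedCols.map (fun col => PySem.List.pyGetD col r 0))

-- ===== PRECONDITION & SPEC =====
-- Pre_ excludes exactly the ragged matrices on which A raises IndexError (some row shorter
-- than the first row, whose length sets the number of columns); B raises there as well.
def Pre_sort_matrix_columns (matrix : List (List Int)) (reverse : Bool) : Prop :=
  ∀ row ∈ matrix, (matrix.headD []).length ≤ row.length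
instance (matrix : List (List Int)) (reverse : Bool) : Decidable (Pre_sort_matrix_columns matrix reverse) := by unfold Pre_sort_matrix_columns; infer_instance

def pvWitness_sort_matrix_columns : List (List Int) × Bool := ([[2, 1], [3, 4]], false)

def Spec_sort_matrix_columns (matrix : List (List Int)) (reverse : Bool) (out : List (List Int)) : Prop := out = sort_matrix_columns_alt matrix reverse
instance (matrix : List (List Int)) (reverse : Bool) (out : List (List Int)) : Decidable (Spec_sort_matrix_columns matrix reverse out) := by unfold Spec_sort_matrix_columns; infer_instance

-- ===== CLAIM (what is proved, stated in full; the proofs are below) =====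
def Claim_equal_sort_matrix_columns : Prop := ∀ (matrix : List (List Int)) (reverse : Bool), Dom_sort_matrix_columns matrix reverse → Pre_sort_matrix_columns matrix reverse → Spec_sort_matrix_columns matrix reverse (sort_matrix_columns matrix reverse)

-- ===== LEMMAS AND PROOFS =====

-- `PySem.List.sorted` with the LinearOrder-derived LT/DecidableLT instances (the ones the
-- PySem order lemmas are stated with); used to bridge the core instances the ports elaborate with
def pvSorted {α κ : Type} [LinearOrder κ] (xs : List α) (key : α → κ) (rev : Bool) : List α :=
  PySem.List.sorted xs key rev

-- `PySem.List.sorted` only consults its instances through `decide (key a < key b)`, so any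
-- two instance pairs deciding equivalent propositions give the same result.
theorem pv_sorted_ext {α κ : Type} {i1 i2 : LT κ} {d1 : @DecidableLT κ i1} {d2 : @DecidableLT κ i2}
    (h : ∀ a b : κ, @LT.lt κ i1 a b ↔ @LT.lt κ i2 a b) (xs : List α) (key : α → κ) (rev : Bool) :
    @PySem.List.sorted α κ i1 d1 xs key rev = @PySem.List.sorted α κ i2 d2 xs key rev := by
  have hb : ∀ (p q : α), (@decide _ (d1 (key p) (key q)) : Bool) = @decide _ (d2 (key p) (key q)) :=
    fun p q => decide_eq_decide.mpr (h (key p) (key q))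
  unfold PySem.List.sorted
  cases rev <;> simp only [] <;> congr 1 <;> funext acc x <;> congr 1 <;> funext a b
  · exact hb a b
  · exact hb b a

theorem pv_bridgeI {α : Type} (xs : List α) (key : α → Int) (rev : Bool) :
    PySem.List.sorted xs key rev = pvSorted xs key rev :=
  pv_sorted_ext (fun _ _ => Iff.rfl) xs key rev

theorem pv_bridgeL {α : Type} (xs : List α) (key : α → List Int) (rev : Bool) :
    PySem.List.sorted xs key rev = pvSorted xs key rev :=
  pv_sorted_ext (fun _ _ => Iff.rfl) xs key rev

theorem pv_insertBy_congr {α : Type} {b1 b2 : α → α → Bool} (x : α) :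
    ∀ (ys : List α), (∀ y ∈ ys, b1 x y = b2 x y) →
    PySem.List.insertBy b1 x ys = PySem.List.insertBy b2 x ys := by
  intro ys
  induction ys with
  | nil => intro; rfl
  | cons y ys ih =>
    intro h
    simp only [PySem.List.insertBy]
    rw [h y (by simp), ih (fun z hz => h z (by simp [hz]))]

theorem pv_foldl_insertBy_congr {α : Type} (P : α → Prop) {b1 b2 : α → α → Bool}
    (h : ∀ a b, P a → P b → b1 a b = b2 a b) :
    ∀ (l acc : List α), (∀ x ∈ l, P x) → (∀ x ∈ acc, P x) →
    l.foldl (fun acc x => PySem.List.insertBy b1 x acc) acc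
      = l.foldl (fun acc x => PySem.List.insertBy b2 x acc) acc := by
  intro l
  induction l with
  | nil => intros; rfl
  | cons x l ih =>
    intro acc hl hacc
    simp only [List.foldl_cons]
    rw [pv_insertBy_congr x acc (fun y hy => h x y (hl x (by simp)) (hacc y hy))]
    exact ih _ (fun z hz => hl z (by simp [hz]))
      (fun z hz => ((PySem.List.mem_insertBy _ x z acc).mp hz).elim
        (fun he => he ▸ hl x (by simp)) (fun hm => hacc z hm))

theorem pv_compare_lt : ∀ {a b : List Int}, a.length = b.length → (pvCompare a b < 0 ↔ a < b) := by
  intro a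
  induction a with
  | nil => intro b h; cases b with
    | nil => simp [pvCompare]
    | cons y ys => simp at h
  | cons x xs ih =>
    intro b h
    cases b with
    | nil => simp at h
    | cons y ys =>
      simp only [List.length_cons, Nat.add_right_cancel_iff] at h
      simp only [pvCompare, List.cons_lt_cons_iff]
      rcases lt_trichotomy x y with hc | hc | hc
      · simp [not_lt.mpr (le_of_lt hc), hc]
      · subst hc; simp [ih h]
      · rw [if_pos (show x > y by omega)]
        simp only [show ¬((1:Int) < 0) by norm_num, false_iff]
        rintro (h1 | ⟨h1, _⟩) <;> omega

theorem pv_append_lt : ∀ {u v : List Int}, u.length = v.length → ∀ {x y : Int},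
    (u ++ [x] < v ++ [y] ↔ (u < v ∨ (u = v ∧ x < y))) := by
  intro u
  induction u with
  | nil => intro v h x y; cases v with
    | nil => simp [List.cons_lt_cons_iff]
    | cons b bs => simp at h
  | cons a as ih =>
    intro v h x y
    cases v with
    | nil => simp at h
    | cons b bs =>
      simp only [List.length_cons, Nat.add_right_cancel_iff] at h
      simp only [List.cons_append, List.cons_lt_cons_iff, ih h, List.cons.injEq]
      tauto

theorem pv_negmap_lt : ∀ {u v : List Int}, u.length = v.length →
    ((u.map Neg.neg < v.map Neg.neg) ↔ v < u) := by
  intro u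
  induction u with
  | nil => intro v h; cases v with
    | nil => simp
    | cons b bs => simp at h
  | cons a as ih =>
    intro v h
    cases v with
    | nil => simp at h
    | cons b bs =>
      simp only [List.length_cons, Nat.add_right_cancel_iff] at h
      simp only [List.map_cons, List.cons_lt_cons_iff, ih h]
      constructor
      · rintro (h1 | ⟨h1, h2⟩)
        · left; omega
        · right; exact ⟨by omega, h2⟩
      · rintro (h1 | ⟨h1, h2⟩)
        · left; omega
        · right; exact ⟨by omega, h2⟩

theorem pv_fullkey_self {n : Nat} {a : List Int} (h : a.length = n) :
    (List.range n).map (fun r : Nat => PySem.List.pyGetD a (r : Int) 0) = a := by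
  subst h
  apply List.ext_getElem (by simp)
  intro i h1 h2
  simp only [List.getElem_map, List.getElem_range]
  rw [PySem.List.pyGetD_eq_getElem a 0 (by omega) (by simpa using h2)]
  simp

theorem pv_sorted_rev_eq {α κ1 κ2 : Type} [LinearOrder κ1] [LinearOrder κ2]
    (k1 : α → κ1) (k2 : α → κ2) (h : ∀ a b, k1 b < k1 a ↔ k2 a < k2 b) (xs : List α) :
    PySem.List.sorted xs k1 true = PySem.List.sorted xs k2 false := by
  rw [PySem.List.sorted_rev_eq_foldl_insertBy, PySem.List.sorted_eq_foldl_insertBy]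
  congr 1
  funext acc x
  congr 1
  funext a b
  exact decide_eq_decide.mpr (h a b)

theorem pv_insertBy_map {α β : Type} (g : α → β) (b : β → β → Bool) (x : α) :
    ∀ (l : List α), PySem.List.insertBy b (g x) (l.map g)
      = (PySem.List.insertBy (fun p q => b (g p) (g q)) x l).map g := by
  intro l
  induction l with
  | nil => rfl
  | cons y ys ih =>
    simp only [List.map_cons, PySem.List.insertBy]
    by_cases hb : b (g x) (g y) <;> simp [hb, ih]

theorem pv_sorted_map {α β κ : Type} [LinearOrder κ] (g : α → β) (l : List α) (key : β → κ) (rev : Bool) :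
    PySem.List.sorted (l.map g) key rev = (PySem.List.sorted l (fun x => key (g x)) rev).map g := by
  cases rev
  · rw [PySem.List.sorted_eq_foldl_insertBy, PySem.List.sorted_eq_foldl_insertBy, List.foldl_map]
    suffices h : ∀ acc : List α,
        l.foldl (fun acc x => PySem.List.insertBy (fun a b => decide (key a < key b)) (g x) acc) (acc.map g)
        = (l.foldl (fun acc x => PySem.List.insertBy (fun a b => decide (key (g a) < key (g b))) x acc) acc).map g by
      simpa using h []
    induction l with
    | nil => intro acc; rfl
    | cons y ys ih =>
      intro acc
      simp only [List.foldl_cons, pv_insertBy_map g _ y acc]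
      exact ih _
  · rw [PySem.List.sorted_rev_eq_foldl_insertBy, PySem.List.sorted_rev_eq_foldl_insertBy, List.foldl_map]
    suffices h : ∀ acc : List α,
        l.foldl (fun acc x => PySem.List.insertBy (fun a b => decide (key b < key a)) (g x) acc) (acc.map g)
        = (l.foldl (fun acc x => PySem.List.insertBy (fun a b => decide (key (g b) < key (g a))) x acc) acc).map g by
      simpa using h []
    induction l with
    | nil => intro acc; rfl
    | cons y ys ih =>
      intro acc
      simp only [List.foldl_cons, pv_insertBy_map g _ y acc]
      exact ih _

theorem pv_sorted_append_singleton {α κ : Type} [LinearOrder κ] (key : α → κ) (l : List α) (a : α) :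
    PySem.List.sorted (l ++ [a]) key false
      = PySem.List.insertBy (fun x y => decide (key x < key y)) a (PySem.List.sorted l key false) := by
  rw [PySem.List.sorted_eq_foldl_insertBy, PySem.List.sorted_eq_foldl_insertBy, List.foldl_append]
  rfl

theorem pv_insertBy_fst {α κ : Type} [LinearOrder κ] (key : α → κ) (p : α × Nat) :
    ∀ (S : List (α × Nat)), (∀ q ∈ S, q.2 < p.2) →
    (PySem.List.insertBy (fun x y => decide ((toLex (key x.1, x.2) : Lex (κ × ℕ)) < toLex (key y.1, y.2))) p S).map Prod.fst
      = PySem.List.insertBy (fun x y => decide (key x < key y)) p.1 (S.map Prod.fst) := by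
  intro S
  induction S with
  | nil => intro _; rfl
  | cons q S ih =>
    intro h
    simp only [List.map_cons, PySem.List.insertBy]
    have hq : q.2 < p.2 := h q (by simp)
    have hd : (decide ((toLex (key p.1, p.2) : Lex (κ × ℕ)) < toLex (key q.1, q.2)))
        = decide (key p.1 < key q.1) := by
      apply decide_eq_decide.mpr
      rw [Prod.Lex.lt_iff]
      simp only [ofLex_toLex]
      constructor
      · rintro (h1 | ⟨h1, h2⟩)
        · exact h1
        · omega
      · exact fun h1 => Or.inl h1
    simp only [hd]
    by_cases hb : key p.1 < key q.1 <;>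
      simp [hb, ih (fun z hz => h z (by simp [hz]))]

-- STABILITY: sorting a list decorated with strictly increasing tags by the lexicographic
-- (key, tag) pair computes the stable sort of the undecorated list.
theorem pv_stable {α κ : Type} [LinearOrder κ] (key : α → κ) :
    ∀ (D : List (α × Nat)), D.Pairwise (fun p q => p.2 < q.2) →
    PySem.List.sorted (D.map Prod.fst) key false
      = (PySem.List.sorted D (fun p => (toLex (key p.1, p.2) : Lex (κ × ℕ))) false).map Prod.fst := by
  intro D
  induction D using List.reverseRecOn with
  | nil => intro _; rfl
  | append_singleton E p ih =>
    intro hpair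
    rw [List.pairwise_append] at hpair
    obtain ⟨hE, -, hEp⟩ := hpair
    rw [List.map_append, List.map_cons, List.map_nil,
      pv_sorted_append_singleton key (E.map Prod.fst) p.1,
      pv_sorted_append_singleton _ E p, ih hE,
      pv_insertBy_fst key p _ (fun q hq => hEp q ((PySem.List.mem_sorted E _ false q).mp hq) p (by simp))]

theorem pv_zipIdx_inc {α : Type} (l : List α) : l.zipIdx.Pairwise (fun p q => p.2 < q.2) := by
  have h := (List.pairwise_map (f := (Prod.snd : α × Nat → Nat)) (R := (· < ·)) (l := l.zipIdx))
  rw [List.zipIdx_map_snd] at h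
  exact h.mp List.pairwise_lt_range'

theorem pv_zipIdx_snd_nodup {α : Type} (l : List α) : (l.zipIdx.map Prod.snd).Nodup := by
  rw [List.zipIdx_map_snd]; exact List.nodup_range'

-- CRUX: a stable pass on key k followed by a stable sort on a fixed-length key ks
-- is the stable sort on the combined key ks ++ [k]
theorem pv_crux {α : Type} (k : α → Int) (ks : α → List Int)
    (hlen : ∀ a b, (ks a).length = (ks b).length) (xs : List α) :
    pvSorted (pvSorted xs k false) ks false = pvSorted xs (fun a => ks a ++ [k a]) false := by
  classical
  set I := xs.zipIdx with hI
  have hIinc : I.Pairwise (fun p q => p.2 < q.2) := pv_zipIdx_inc xs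
  set W : List (α × ℕ) := pvSorted I (fun p => (toLex (toLex (ks p.1, k p.1), p.2) : Lex (Lex (List ℤ × ℤ) × ℕ))) false with hW
  have hWperm : W.Perm I := PySem.List.sorted_perm _ _ _
  have hWne : W.Pairwise (fun p q => p.2 ≠ q.2) := by
    have hnd : (W.map Prod.snd).Nodup := ((hWperm.map Prod.snd).nodup_iff).mpr (pv_zipIdx_snd_nodup xs)
    exact List.pairwise_map.mp hnd
  have hR1 : pvSorted xs (fun a => ks a ++ [k a]) false
      = (pvSorted I (fun p => (toLex (ks p.1 ++ [k p.1], p.2) : Lex (List ℤ × ℕ))) false).map Prod.fst := by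
    have h := pv_stable (fun a => ks a ++ [k a]) I hIinc
    rwa [List.zipIdx_map_fst] at h
  have hR2 : pvSorted I (fun p => (toLex (ks p.1 ++ [k p.1], p.2) : Lex (List ℤ × ℕ))) false = W := by
    apply PySem.List.sorted_eq_of_perm_of_pairwise_lt _ _ _ hWperm
    have hle : W.Pairwise (fun p q =>
        (toLex (toLex (ks p.1, k p.1), p.2) : Lex (Lex (List ℤ × ℤ) × ℕ))
          ≤ toLex (toLex (ks q.1, k q.1), q.2)) := PySem.List.sorted_pairwise I _
    refine (hle.and hWne).imp ?_
    rintro p q ⟨hle1, hne⟩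
    rw [Prod.Lex.le_iff] at hle1
    rw [Prod.Lex.lt_iff]
    simp only [ofLex_toLex] at hle1 ⊢
    rcases hle1 with hlt | ⟨heq, hle2⟩
    · rw [Prod.Lex.lt_iff] at hlt
      simp only [ofLex_toLex] at hlt
      exact Or.inl ((pv_append_lt (hlen _ _)).mpr hlt)
    · obtain ⟨e1, e2⟩ := Prod.mk.injEq .. ▸ toLex_inj.mp heq
      exact Or.inr ⟨by rw [e1, e2], lt_of_le_of_ne hle2 hne⟩
  set S : List (α × ℕ) := pvSorted I (fun p => (toLex (k p.1, p.2) : Lex (ℤ × ℕ))) false with hS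
  have hSperm : S.Perm I := PySem.List.sorted_perm _ _ _
  have hS1 : pvSorted xs k false = S.map Prod.fst := by
    have h := pv_stable k I hIinc
    rwa [List.zipIdx_map_fst] at h
  have hL1 : pvSorted (S.map Prod.fst) ks false
      = (pvSorted ((S.map Prod.fst).zipIdx) (fun p => (toLex (ks p.1, p.2) : Lex (List ℤ × ℕ))) false).map Prod.fst := by
    have h := pv_stable ks ((S.map Prod.fst).zipIdx) (pv_zipIdx_inc _)
    rwa [List.zipIdx_map_fst] at h
  set Z : List ((α × ℕ) × ℕ) := pvSorted S.zipIdx (fun q => (toLex (ks q.1.1, q.2) : Lex (List ℤ × ℕ))) false with hZ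
  have hL2 : pvSorted ((S.map Prod.fst).zipIdx) (fun p => (toLex (ks p.1, p.2) : Lex (List ℤ × ℕ))) false
      = Z.map (Prod.map Prod.fst id) := by
    simp only [pvSorted]
    rw [List.zipIdx_map,
      pv_sorted_map (Prod.map Prod.fst id) S.zipIdx (fun p : α × ℕ => (toLex (ks p.1, p.2) : Lex (List ℤ × ℕ))) false]
    congr 1
  have hZperm : Z.Perm S.zipIdx := PySem.List.sorted_perm _ _ _
  have hZne : Z.Pairwise (fun p q => p.2 ≠ q.2) := by
    have hnd : (Z.map Prod.snd).Nodup := ((hZperm.map Prod.snd).nodup_iff).mpr (pv_zipIdx_snd_nodup S)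
    exact List.pairwise_map.mp hnd
  have hmemZ : ∀ p ∈ Z, ∃ (hlt : p.2 < S.length), p.1 = S[p.2]'hlt := by
    intro p hp
    have hp' : p ∈ S.zipIdx := (PySem.List.mem_sorted _ _ _ _).mp hp
    obtain ⟨-, h2, h3⟩ := List.mem_zipIdx (x := p.1) (i := p.2) (by simpa using hp')
    exact ⟨by omega, by simpa using h3⟩
  have hSpair : ∀ (j j' : ℕ) (hj : j < S.length) (hj' : j' < S.length), j < j' →
      (toLex (k (S[j].1), S[j].2) : Lex (ℤ × ℕ)) ≤ toLex (k (S[j'].1), S[j'].2) := by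
    have hp : S.Pairwise (fun p q => (toLex (k p.1, p.2) : Lex (ℤ × ℕ)) ≤ toLex (k q.1, q.2)) :=
      PySem.List.sorted_pairwise I _
    intro j j' hj hj' hjj
    exact List.pairwise_iff_getElem.mp hp j j' hj hj' hjj
  have hSsnd : ∀ (j j' : ℕ) (hj : j < S.length) (hj' : j' < S.length), j ≠ j' → (S[j]).2 ≠ (S[j']).2 := by
    have hnd : (S.map Prod.snd).Nodup := ((hSperm.map Prod.snd).nodup_iff).mpr (pv_zipIdx_snd_nodup xs)
    intro j j' hj hj' hjj hc
    apply hjj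
    have := hnd.getElem_inj_iff (i := j) (hi := by simpa using hj) (j := j') (hj := by simpa using hj')
    apply this.mp
    simpa using hc
  have hZW : Z.map Prod.fst = W := by
    symm
    apply PySem.List.sorted_eq_of_perm_of_pairwise_lt
    · exact ((hZperm.map Prod.fst).trans (by rw [List.zipIdx_map_fst])).trans hSperm
    · rw [List.pairwise_map]
      have hZle : Z.Pairwise (fun p q =>
          (toLex (ks p.1.1, p.2) : Lex (List ℤ × ℕ)) ≤ toLex (ks q.1.1, q.2)) :=
        PySem.List.sorted_pairwise _ _
      refine (hZle.and hZne).imp_of_mem ?_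
      intro p q hp hq h
      obtain ⟨hle1, hne⟩ := h
      obtain ⟨hplt, hpe⟩ := hmemZ p hp
      obtain ⟨hqlt, hqe⟩ := hmemZ q hq
      rw [Prod.Lex.le_iff] at hle1
      rw [Prod.Lex.lt_iff]
      simp only [ofLex_toLex] at hle1 ⊢
      rcases hle1 with hlt | ⟨heq, hle2⟩
      · left
        rw [Prod.Lex.lt_iff]
        simp only [ofLex_toLex]
        exact Or.inl hlt
      · have hlt2 : p.2 < q.2 := lt_of_le_of_ne hle2 hne
        have h1 := hSpair p.2 q.2 hplt hqlt hlt2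
        rw [← hpe, ← hqe] at h1
        have h2 : p.1.2 ≠ q.1.2 := by
          have := hSsnd p.2 q.2 hplt hqlt (by omega)
          rw [← hpe, ← hqe] at this
          exact this
        rw [Prod.Lex.le_iff] at h1
        simp only [ofLex_toLex] at h1
        rcases h1 with h1 | ⟨h1a, h1b⟩
        · left
          rw [Prod.Lex.lt_iff]
          simp only [ofLex_toLex]
          exact Or.inr ⟨heq, h1⟩
        · right
          exact ⟨by rw [heq, h1a], lt_of_le_of_ne h1b h2⟩
  calc pvSorted (pvSorted xs k false) ks false
      = pvSorted (S.map Prod.fst) ks false := by rw [hS1]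
    _ = (pvSorted ((S.map Prod.fst).zipIdx) (fun p => (toLex (ks p.1, p.2) : Lex (List ℤ × ℕ))) false).map Prod.fst := hL1
    _ = (Z.map (Prod.map Prod.fst id)).map Prod.fst := by rw [hL2]
    _ = (Z.map Prod.fst).map Prod.fst := by
          rw [List.map_map, List.map_map]
          congr 1
    _ = W.map Prod.fst := by rw [hZW]
    _ = pvSorted xs (fun a => ks a ++ [k a]) false := by rw [← hR2, ← hR1]

theorem pv_mem_pvSorted {α κ : Type} [LinearOrder κ] (xs : List α) (key : α → κ) (rev : Bool) (x : α) :
    x ∈ pvSorted xs key rev ↔ x ∈ xs :=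
  PySem.List.mem_sorted xs key rev x

theorem pv_sorted_const_nil {α : Type} (xs : List α) :
    pvSorted xs (fun _ => ([] : List Int)) false = xs := by
  apply PySem.List.sorted_eq_self_of_pairwise
  exact List.pairwise_iff_getElem.mpr (fun i j hi hj hij => le_refl _)

theorem pv_radix {α : Type} (K : Nat → α → Int) :
    ∀ (n : Nat) (xs : List α),
    ((List.range n).reverse).foldl (fun cs r => pvSorted cs (K r) false) xs
      = pvSorted xs (fun a => (List.range n).map (fun r => K r a)) false := by
  intro n
  induction n with
  | zero => intro xs; simpa using (pv_sorted_const_nil xs).symm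
  | succ n ih =>
    intro xs
    rw [List.range_succ, List.reverse_append, List.reverse_singleton]
    simp only [List.singleton_append, List.foldl_cons]
    rw [ih (pvSorted xs (K n) false),
      pv_crux (K n) (fun a => (List.range n).map (fun r => K r a)) (fun a b => by simp) xs]
    congr 1
    funext a
    rw [List.map_append]
    rfl

theorem pv_radix_rev {α : Type} (K : Nat → α → Int) (n : Nat) (xs : List α) :
    ((List.range n).reverse).foldl (fun cs r => pvSorted cs (K r) true) xs
      = pvSorted xs (fun a => (List.range n).map (fun r => K r a)) true := by
  have hpass : (fun (cs : List α) (r : Nat) => pvSorted cs (K r) true)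
      = fun cs r => pvSorted cs (fun a => -(K r a)) false := by
    funext cs r
    exact pv_sorted_rev_eq (K r) (fun a => -(K r a))
      (fun a b => by show K r b < K r a ↔ -(K r a) < -(K r b); omega) cs
  rw [hpass, pv_radix (fun r a => -(K r a)) n xs]
  have h2 : (fun a => (List.range n).map (fun r => -(K r a)))
      = fun a => ((List.range n).map (fun r => K r a)).map Neg.neg := by
    funext a; rw [List.map_map]; rfl
  rw [h2]
  exact (pv_sorted_rev_eq (fun a => (List.range n).map (fun r => K r a))
    (fun a => ((List.range n).map (fun r => K r a)).map Neg.neg)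
    (fun a b => by
      show (List.range n).map (fun r => K r b) < (List.range n).map (fun r => K r a)
        ↔ ((List.range n).map (fun r => K r a)).map Neg.neg < ((List.range n).map (fun r => K r b)).map Neg.neg
      exact (pv_negmap_lt (by simp)).symm) xs).symm

theorem pv_radix_all {α : Type} (K : Nat → α → Int) (rev : Bool) (n : Nat) (xs : List α) :
    ((List.range n).reverse).foldl (fun cs r => pvSorted cs (K r) rev) xs
      = pvSorted xs (fun a => (List.range n).map (fun r => K r a)) rev := by
  cases rev
  · exact pv_radix K n xs
  · exact pv_radix_rev K n xs

theorem pv_pyRange_down (n : Nat) :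
    PySem.List.pyRange ((n : Int) - 1) (-1) (-1) = ((List.range n).reverse).map (fun k : Nat => (k : Int)) := by
  unfold PySem.List.pyRange
  norm_num
  rw [show (if 0 < n then n else 0) = n by split <;> omega]
  apply List.ext_getElem
  · simp
  · intro i h1 h2
    simp only [List.getElem_reverse, List.getElem_map, List.getElem_range, List.length_map,
      List.length_range] at h1 h2 ⊢
    omega

theorem pv_inner_len : ∀ (col : List Int) (kk : Nat) (om : List (List Int)),
    ((col.zipIdx kk).foldl (fun om p => om.modify p.2 (fun row => row ++ [p.1])) om).length = om.length := by
  intro col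
  induction col with
  | nil => intro kk om; rfl
  | cons a col ih =>
    intro kk om
    rw [List.zipIdx_cons, List.foldl_cons, ih, List.length_modify]

theorem pv_inner_getD : ∀ (col : List Int) (kk : Nat) (om : List (List Int)) (j : Nat),
    ((col.zipIdx kk).foldl (fun om p => om.modify p.2 (fun row => row ++ [p.1])) om).getD j []
      = if kk ≤ j ∧ j < kk + col.length ∧ j < om.length then om.getD j [] ++ [col.getD (j - kk) 0]
        else om.getD j [] := by
  intro col
  induction col with
  | nil =>
    intro kk om j
    rw [if_neg (by simp only [List.length_nil]; omega)]
    rfl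
  | cons a col ih =>
    intro kk om j
    rw [List.zipIdx_cons, List.foldl_cons, ih]
    have hmod : ∀ (jj : Nat), (om.modify kk (fun row => row ++ [a])).getD jj []
        = if kk = jj ∧ jj < om.length then om.getD jj [] ++ [a] else om.getD jj [] := by
      intro jj
      by_cases hjj : jj < om.length
      · rw [List.getD_eq_getElem _ _ (by rw [List.length_modify]; exact hjj),
          List.getD_eq_getElem _ _ hjj] at *
        rw [List.getElem_modify]
        split_ifs with h1 h2 h2 <;> simp_all
      · rw [if_neg (by omega)]
        rw [List.getD_eq_default _ _ (by rw [List.length_modify]; omega),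
          List.getD_eq_default _ _ (by omega)]
    rw [List.length_modify]
    by_cases hc : kk + 1 ≤ j ∧ j < kk + 1 + col.length ∧ j < om.length
    · rw [if_pos hc, if_pos (by simp only [List.length_cons]; omega), hmod j, if_neg (by omega)]
      have : j - kk = (j - (kk + 1)) + 1 := by omega
      rw [this]
      rfl
    · rw [if_neg hc, hmod j]
      by_cases h2 : kk = j ∧ j < om.length
      · rw [if_pos h2, if_pos (by simp only [List.length_cons]; omega)]
        have : j - kk = 0 := by omega
        rw [this]
        rfl
      · rw [if_neg h2, if_neg (by simp only [List.length_cons]; omega)]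

theorem pv_outer_len : ∀ (cols : List (List Int)) (om : List (List Int)),
    (cols.foldl (fun om col => (col.zipIdx).foldl (fun om p => om.modify p.2 (fun row => row ++ [p.1])) om) om).length
      = om.length := by
  intro cols
  induction cols with
  | nil => intro om; rfl
  | cons c cols ih => intro om; rw [List.foldl_cons, ih, pv_inner_len]

theorem pv_outer_getD : ∀ (cols : List (List Int)) (om : List (List Int)),
    (∀ c ∈ cols, c.length = om.length) → ∀ (j : Nat), j < om.length →
    (cols.foldl (fun om col => (col.zipIdx).foldl (fun om p => om.modify p.2 (fun row => row ++ [p.1])) om) om).getD j []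
      = om.getD j [] ++ cols.map (fun c => c.getD j 0) := by
  intro cols
  induction cols with
  | nil => intro om _ j hj; simp
  | cons c cols ih =>
    intro om hc j hj
    rw [List.foldl_cons]
    rw [ih _ (fun d hd => by rw [pv_inner_len]; exact hc d (by simp [hd])) j (by rw [pv_inner_len]; exact hj)]
    rw [pv_inner_getD, if_pos ⟨by omega, by rw [hc c (by simp)]; omega, hj⟩]
    simp

-- (the Lean ports are total — pyGetD supplies defaults where Python would raise — so the
-- agreement below holds without using Pre_; Pre_ still delimits where the Python A returns)
theorem pv_main (m0 : List Int) (rest : List (List Int)) (reverse : Bool) :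
    sort_matrix_columns (m0 :: rest) reverse = sort_matrix_columns_alt (m0 :: rest) reverse := by
  have hg1 : ¬ (PySem.List.len (m0 :: rest) = 0) := by simp [PySem.List.len]; omega
  have hgd : PySem.List.pyGetD (m0 :: rest) 0 [] = m0 := by simp [PySem.List.pyGetD]
  simp only [sort_matrix_columns, sort_matrix_columns_alt, hgd]
  rw [if_neg hg1, if_neg hg1]
  by_cases hm0 : PySem.List.len m0 = 0
  · rw [if_pos hm0, if_pos hm0]
  rw [if_neg hm0, if_neg hm0]
  set n : Nat := (m0 :: rest).length with hn
  set C : List (List Int) := (PySem.List.pyRange 0 (PySem.List.len m0)).map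
    (fun c => (m0 :: rest).map (fun row => PySem.List.pyGetD row c 0)) with hC
  have hAcols : (PySem.List.pyRange 0 (PySem.List.len m0)).foldl (fun cols column =>
      cols ++ [(PySem.List.pyRange 0 (PySem.List.len (m0 :: rest))).foldl (fun values row =>
        values ++ [PySem.List.pyGetD (PySem.List.pyGetD (m0 :: rest) row []) column 0]) []]) [] = C := by
    rw [PySem.List.foldl_append_singleton_eq_map, List.nil_append, hC]
    apply List.map_congr_left
    intro column _
    rw [PySem.List.foldl_append_singleton_eq_map, List.nil_append]
    conv_rhs => rw [← PySem.List.map_pyGetD_pyRange_zero (m0 :: rest) []]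
    rw [List.map_map]
    rfl
  have hClen : ∀ c ∈ C, c.length = n := by
    intro c hc
    rw [hC] at hc
    obtain ⟨x, -, hx⟩ := List.mem_map.mp hc
    rw [← hx]
    simp [hn]
  have hBsort : (PySem.List.pyRange (PySem.List.len (m0 :: rest) - 1) (-1) (-1)).foldl
      (fun cs r => PySem.List.sorted cs (fun col => PySem.List.pyGetD col r 0) reverse) C
      = pvSorted C (fun a => (List.range n).map (fun r : Nat => PySem.List.pyGetD a (r : Int) 0)) reverse := by
    rw [show PySem.List.len (m0 :: rest) = ((n : Nat) : Int) from rfl, pv_pyRange_down n, List.foldl_map]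
    simp only [pv_bridgeI]
    exact pv_radix_all (fun (r : Nat) (col : List Int) => PySem.List.pyGetD col (r : Int) 0) reverse n C
  have hkeycmp : ∀ (rv : Bool), (∀ a b : List Int, a.length = n → b.length = n →
      (if rv then decide (pvCompare b a < 0) else decide (pvCompare a b < 0))
        = (if rv then decide ((List.range n).map (fun r : Nat => PySem.List.pyGetD b (r : Int) 0)
              < (List.range n).map (fun r : Nat => PySem.List.pyGetD a (r : Int) 0))
           else decide ((List.range n).map (fun r : Nat => PySem.List.pyGetD a (r : Int) 0)
              < (List.range n).map (fun r : Nat => PySem.List.pyGetD b (r : Int) 0)))) := by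
    intro rv a b ha hb
    cases rv <;> simp only [if_true, if_false, Bool.false_eq_true] <;> apply decide_eq_decide.mpr
    · rw [pv_fullkey_self ha, pv_fullkey_self hb]
      exact pv_compare_lt (ha.trans hb.symm)
    · rw [pv_fullkey_self ha, pv_fullkey_self hb]
      exact pv_compare_lt (hb.trans ha.symm)
  have hAsort : C.foldl (fun acc x => PySem.List.insertBy
        (fun a b => if reverse then decide (pvCompare b a < 0) else decide (pvCompare a b < 0)) x acc) []
      = pvSorted C (fun a => (List.range n).map (fun r : Nat => PySem.List.pyGetD a (r : Int) 0)) reverse := by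
    rw [← pv_bridgeL C (fun a => (List.range n).map (fun r : Nat => PySem.List.pyGetD a (r : Int) 0)) reverse]
    cases reverse
    · rw [PySem.List.sorted_eq_foldl_insertBy]
      exact pv_foldl_insertBy_congr (fun c => c.length = n)
        (fun a b ha hb => by simpa using hkeycmp false a b ha hb) C [] hClen (by simp)
    · rw [PySem.List.sorted_rev_eq_foldl_insertBy]
      exact pv_foldl_insertBy_congr (fun c => c.length = n)
        (fun a b ha hb => by simpa using hkeycmp true a b ha hb) C [] hClen (by simp)
  have hord : (PySem.List.pyRange 0 (PySem.List.len (m0 :: rest))).foldl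
      (fun om _ => om ++ [([] : List Int)]) [] = List.replicate n ([] : List Int) := by
    rw [PySem.List.foldl_append_singleton_eq_map (f := fun _ => ([] : List Int)), List.nil_append,
      show PySem.List.len (m0 :: rest) = ((n : Nat) : Int) from rfl, PySem.List.pyRange_zero_natCast]
    simp [Function.comp_def, List.map_const']
  rw [hAcols, hAsort, hBsort, hord]
  set SC := pvSorted C (fun a => (List.range n).map (fun r : Nat => PySem.List.pyGetD a (r : Int) 0)) reverse with hSC
  have hSClen : ∀ c ∈ SC, c.length = n := fun c hc =>
    hClen c ((pv_mem_pvSorted _ _ _ c).mp hc)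
  rw [show PySem.List.len (m0 :: rest) = ((n : Nat) : Int) from rfl, PySem.List.pyRange_zero_natCast]
  apply List.ext_getElem
  · rw [pv_outer_len]
    simp
  · intro j h1 h2
    have hjn : j < n := by
      rw [pv_outer_len] at h1
      simpa using h1
    rw [← List.getD_eq_getElem _ [] h1,
      pv_outer_getD SC (List.replicate n []) (fun c hc => by rw [hSClen c hc]; simp) j (by simpa)]
    have hrep : (List.replicate n ([] : List Int)).getD j [] = [] := by
      rw [List.getD_eq_getElem _ _ (by simpa using hjn)]
      simp
    rw [hrep, List.nil_append]
    simp only [List.getElem_map, List.getElem_range]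
    apply List.map_congr_left
    intro c hc
    rw [PySem.List.pyGetD_eq_getElem c 0 (by omega) (by rw [hSClen c hc]; exact_mod_cast hjn),
      List.getD_eq_getElem _ _ (by rw [hSClen c hc]; exact hjn)]
    simp

-- ===== VERDICT (by name: the statement is the Claim_ definition above) =====
theorem sort_matrix_columns_spec : Claim_equal_sort_matrix_columns := by
  unfold Claim_equal_sort_matrix_columns
  intro matrix reverse _hdom _hpre
  unfold Spec_sort_matrix_columns
  cases matrix with
  | nil => rfl
  | cons m0 rest => exact pv_main m0 rest reverse
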